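-- pv_equiv track=rewrite | github.com/e-hryhorova/hillel_homework | task_3_part_1.py | change_consonants_letters_to_vowel
-- ===== SOURCE A (Python) =====
-- soglasnye = ['b', 'c', 'd', 'f', 'g', 'h', 'k', 'l', 'm', 'n', 'p', 'r', 's', 't', 'w', 'v', 'x', 'z']
--
-- def change_consonants_letters_to_vowel(s):
--     stroka2 = ""
--     for i in s:
--         if i in soglasnye:
--             letter = 'a'
--             stroka2 = stroka2 + letter
--         else:
--             stroka2 = stroka2 + i
--     return stroka2
-- ===== SOURCE B (Python) =====
-- soglasnye = ['b', 'c', 'd', 'f', 'g', 'h', 'k', 'l', 'm', 'n', 'p', 'r', 's', 't', 'w', 'v', 'x', 'z']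
--
-- _table = str.maketrans({c: 'a' for c in soglasnye})
--
-- def change_consonants_letters_to_vowel(s):
--     return s.translate(_table)
-- ===== Notes on version B (the rewrite author's own statement) =====
-- stated objective: idiomatic
-- what changed: B precomputes a translation table (consonant -> 'a') once and applies it with a single table-driven str.translate call, replacing A's per-character loop with list-membership test and repeated string concatenation.
import Mathlib
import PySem

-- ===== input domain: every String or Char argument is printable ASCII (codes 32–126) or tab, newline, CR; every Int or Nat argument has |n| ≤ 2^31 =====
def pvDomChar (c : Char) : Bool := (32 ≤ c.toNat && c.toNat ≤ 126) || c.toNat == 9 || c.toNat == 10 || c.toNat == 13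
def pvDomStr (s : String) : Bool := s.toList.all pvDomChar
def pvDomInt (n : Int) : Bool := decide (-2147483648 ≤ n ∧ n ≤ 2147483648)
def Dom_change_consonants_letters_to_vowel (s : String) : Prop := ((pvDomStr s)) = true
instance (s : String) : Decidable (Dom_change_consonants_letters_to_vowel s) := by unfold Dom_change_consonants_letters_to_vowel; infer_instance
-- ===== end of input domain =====

-- B replaces A's per-char loop with membership test by a precomputed translation table applied in one pass (idiomatic).
-- ===== PORT A =====
def soglasnye : List Char := ['b', 'c', 'd', 'f', 'g', 'h', 'k', 'l', 'm', 'n', 'p', 'r', 's', 't', 'w', 'v', 'x', 'z']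

def change_consonants_letters_to_vowel (s : String) : String :=
  String.mk (s.toList.foldl
    (fun stroka2 i => if i ∈ soglasnye then stroka2 ++ ['a'] else stroka2 ++ [i]) [])

-- ===== PORT B =====
-- the translation table built once: str.maketrans({c: 'a' for c in soglasnye})
def pvTable : PySem.Dict Char Char := PySem.Dict.ofList (soglasnye.map (fun c => (c, 'a')))

def change_consonants_letters_to_vowel_alt (s : String) : String :=
  String.mk (s.toList.map (fun c => pvTable.getD c c))

-- ===== PRECONDITION & SPEC =====
def Spec_change_consonants_letters_to_vowel (s : String) (out : String) : Prop := out = change_consonants_letters_to_vowel_alt s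
instance (s : String) (out : String) : Decidable (Spec_change_consonants_letters_to_vowel s out) := by unfold Spec_change_consonants_letters_to_vowel; infer_instance

-- ===== CLAIM (what is proved, stated in full; the proofs are below) =====
def Claim_equal_change_consonants_letters_to_vowel : Prop := ∀ (s : String), Dom_change_consonants_letters_to_vowel s → Spec_change_consonants_letters_to_vowel s (change_consonants_letters_to_vowel s)

-- ===== LEMMAS AND PROOFS =====
theorem getD_update_map (c : Char) (l : List Char) (d : PySem.Dict Char Char) :
    (d.update (l.map (fun x => (x, 'a')))).getD c c = if c ∈ l then 'a' else d.getD c c := by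
  induction l generalizing d with
  | nil => simp [PySem.Dict.update]
  | cons h t ih =>
    simp only [List.map, PySem.Dict.update, List.foldl] at *
    rw [ih]
    by_cases hc : c ∈ t
    · simp [hc]
    · simp [hc, PySem.Dict.getD_insert, List.mem_cons]

theorem table_getD (c : Char) : pvTable.getD c c = if c ∈ soglasnye then 'a' else c := by
  rw [pvTable, PySem.Dict.ofList, getD_update_map]
  simp [PySem.Dict.getD, PySem.Dict.get?, PySem.Dict.empty]

theorem foldl_loop (l : List Char) (acc : List Char) :
    l.foldl (fun st i => if i ∈ soglasnye then st ++ ['a'] else st ++ [i]) acc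
      = acc ++ l.map (fun c => if c ∈ soglasnye then 'a' else c) := by
  induction l generalizing acc with
  | nil => simp
  | cons h t ih => simp only [List.foldl, List.map]; split <;> simp [ih]

-- ===== VERDICT (by name: the statement is the Claim_ definition above) =====
theorem change_consonants_letters_to_vowel_spec : Claim_equal_change_consonants_letters_to_vowel := by
  intro s _
  unfold Spec_change_consonants_letters_to_vowel change_consonants_letters_to_vowel
    change_consonants_letters_to_vowel_alt
  rw [foldl_loop]
  simp [table_getD]
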